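-- pv_equiv track=rewrite | github.com/zelal-Eizaldeen/rare_disease_pyHealth | RDMA/rdma/rdrag/entity.py | _merge_small_sentences
-- ===== SOURCE A (Python) =====
-- from typing import List, Dict, Any, Optional, Tuple
--
-- def _merge_small_sentences(sentences: List[str], min_size: int) -> List[str]:
--     """
--     Merge sentences smaller than the minimum size with subsequent sentences.
--
--     Args:
--         sentences: List of extracted sentences
--         min_size: Minimum character length for a sentence
--
--     Returns:
--         List of merged sentences meeting the minimum size requirement
--     """
--     if not sentences:
--         return []
--
--     if min_size is None or min_size <= 0:
--         return sentences
--
--     merged_sentences = []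
--     current_idx = 0
--
--     while current_idx < len(sentences):
--         current_sentence = sentences[current_idx]
--
--         # If the current sentence is already large enough, add it directly
--         if len(current_sentence) >= min_size:
--             merged_sentences.append(current_sentence)
--             current_idx += 1
--             continue
--
--         # Start merging with next sentences until we reach min_size
--         merged_chunk = current_sentence
--         next_idx = current_idx + 1
--
--         while next_idx < len(sentences) and len(merged_chunk) < min_size:
--             # Add the next sentence to our chunk with a space
--             if merged_chunk and sentences[next_idx]:
--                 merged_chunk += " " + sentences[next_idx]
--             else:
--                 merged_chunk += sentences[next_idx]
--             next_idx += 1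
--
--         # Add the merged chunk to our results
--         merged_sentences.append(merged_chunk)
--
--         # Update the index to continue after the merged sentences
--         current_idx = next_idx
--
--     return merged_sentences
-- ===== SOURCE B (Python) =====
-- def _merge_small_sentences(sentences, min_size):
--     if not sentences:
--         return []
--
--     if min_size is None or min_size <= 0:
--         return sentences
--
--     merged_sentences = []
--     buffer = None
--     for s in sentences:
--         if buffer is None:
--             buffer = s
--         elif buffer and s:
--             buffer = buffer + " " + s
--         else:
--             buffer = buffer + s
--         if len(buffer) >= min_size:
--             merged_sentences.append(buffer)
--             buffer = None
--     if buffer is not None: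
--         merged_sentences.append(buffer)
--     return merged_sentences
-- ===== Notes on version B (the rewrite author's own statement) =====
-- stated objective: simpler
-- what changed: Replaced A's nested index-driven while loops (outer cursor plus inner catch-up loop over next_idx) by a single flat pass over the sentences carrying an optional running buffer that is flushed whenever it reaches min_size.
import Mathlib
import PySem

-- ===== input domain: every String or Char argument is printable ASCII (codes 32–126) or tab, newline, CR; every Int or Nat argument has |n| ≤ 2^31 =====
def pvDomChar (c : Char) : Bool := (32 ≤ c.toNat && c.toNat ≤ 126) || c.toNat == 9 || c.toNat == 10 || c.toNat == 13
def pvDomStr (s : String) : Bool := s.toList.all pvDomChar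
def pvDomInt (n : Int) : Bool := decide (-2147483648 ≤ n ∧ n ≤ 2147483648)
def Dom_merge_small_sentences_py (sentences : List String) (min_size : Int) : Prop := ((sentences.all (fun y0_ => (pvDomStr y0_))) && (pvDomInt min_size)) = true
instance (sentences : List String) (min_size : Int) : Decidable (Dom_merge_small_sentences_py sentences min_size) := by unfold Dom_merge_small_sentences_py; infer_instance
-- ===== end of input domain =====

-- B replaces A's nested index-driven while loops by one flat fold carrying an optional buffer (objective: simpler).

-- ===== PORT A =====
-- inner `while next_idx < len(sentences) and len(merged_chunk) < min_size` loop;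
-- fuel only makes the loop total (it is always ≥ the remaining iterations, so the guard is what stops it)
def mergeInnerA (sentences : List String) (min_size : Int) : Nat → String → Nat → String × Nat
  | 0, merged_chunk, next_idx => (merged_chunk, next_idx)
  | fuel + 1, merged_chunk, next_idx =>
      if next_idx < sentences.length ∧ PySem.Str.len merged_chunk < min_size then
        let s := sentences.getD next_idx ""
        let merged_chunk' := if merged_chunk ≠ "" ∧ s ≠ "" then merged_chunk ++ " " ++ s else merged_chunk ++ s
        mergeInnerA sentences min_size fuel merged_chunk' (next_idx + 1)
      else (merged_chunk, next_idx)

-- outer `while current_idx < len(sentences)` loop, acc = merged_sentences; same fuel discipline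
def mergeOuterA (sentences : List String) (min_size : Int) : Nat → List String → Nat → List String
  | 0, acc, _ => acc
  | fuel + 1, acc, current_idx =>
      if current_idx < sentences.length then
        let current_sentence := sentences.getD current_idx ""
        if min_size ≤ PySem.Str.len current_sentence then
          mergeOuterA sentences min_size fuel (acc ++ [current_sentence]) (current_idx + 1)
        else
          let r := mergeInnerA sentences min_size (sentences.length - (current_idx + 1)) current_sentence (current_idx + 1)
          mergeOuterA sentences min_size fuel (acc ++ [r.1]) r.2
      else acc

def merge_small_sentences_py (sentences : List String) (min_size : Int) : List String :=
  if sentences = [] then []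
  else if min_size ≤ 0 then sentences
  else mergeOuterA sentences min_size sentences.length [] 0

-- ===== PORT B =====
-- one fold step: absorb s into the optional buffer, flush when it reaches min_size
def mergeStepB (min_size : Int) (st : List String × Option String) (s : String) : List String × Option String :=
  let buffer :=
    match st.2 with
    | none => s
    | some b => if b ≠ "" ∧ s ≠ "" then b ++ " " ++ s else b ++ s
  if min_size ≤ PySem.Str.len buffer then (st.1 ++ [buffer], none) else (st.1, some buffer)

def merge_small_sentences_py_alt (sentences : List String) (min_size : Int) : List String :=
  if sentences = [] then []
  else if min_size ≤ 0 then sentences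
  else
    let r := sentences.foldl (mergeStepB min_size) ([], none)
    match r.2 with
    | none => r.1
    | some b => r.1 ++ [b]

-- ===== PRECONDITION & SPEC =====
def Spec_merge_small_sentences_py (sentences : List String) (min_size : Int) (out : List String) : Prop := out = merge_small_sentences_py_alt sentences min_size
instance (sentences : List String) (min_size : Int) (out : List String) : Decidable (Spec_merge_small_sentences_py sentences min_size out) := by unfold Spec_merge_small_sentences_py; infer_instance

-- ===== CLAIM (what is proved, stated in full; the proofs are below) =====
def Claim_equal_merge_small_sentences_py : Prop := ∀ (sentences : List String) (min_size : Int), Dom_merge_small_sentences_py sentences min_size → Spec_merge_small_sentences_py sentences min_size (merge_small_sentences_py sentences min_size)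

-- ===== LEMMAS AND PROOFS =====

-- finish B's fold: flush the leftover buffer, if any
def finB (p : List String × Option String) : List String :=
  match p.2 with
  | none => p.1
  | some b => p.1 ++ [b]

-- past the end of the list, A's outer loop returns its accumulator whatever the fuel
theorem mergeOuterA_past (s : List String) (m : Int) (fuel : Nat) (acc : List String) (i : Nat)
    (h : s.length ≤ i) : mergeOuterA s m fuel acc i = acc := by
  cases fuel with
  | zero => rfl
  | succ fuel => rw [mergeOuterA, if_neg (by omega)]

-- A's inner loop feeding back into the outer loop matches B's fold with the running chunk as buffer
theorem innerA_agrees (s : List String) (m : Int) (fuelO : Nat)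
    (hP : ∀ (i : Nat) (acc : List String), s.length - i ≤ fuelO →
      mergeOuterA s m fuelO acc i = finB ((s.drop i).foldl (mergeStepB m) (acc, none))) :
    ∀ (fuelI j : Nat) (chunk : String) (acc : List String),
      s.length - j ≤ fuelI → s.length - j ≤ fuelO + 1 → PySem.Str.len chunk < m →
      mergeOuterA s m fuelO (acc ++ [(mergeInnerA s m fuelI chunk j).1]) (mergeInnerA s m fuelI chunk j).2
        = finB ((s.drop j).foldl (mergeStepB m) (acc, some chunk)) := by
  intro fuelI
  induction fuelI with
  | zero =>
      intro j chunk acc hI _ _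
      have hge : s.length ≤ j := by omega
      rw [List.drop_eq_nil_of_le hge]
      rw [mergeInnerA, mergeOuterA_past s m fuelO _ _ hge]
      rfl
  | succ fuelI ih =>
      intro j chunk acc hI hO hc
      by_cases h : j < s.length
      · rw [List.drop_eq_getElem_cons h]
        rw [mergeInnerA, if_pos ⟨h, hc⟩]
        simp only [List.foldl_cons, List.getD_eq_getElem s "" h]
        set c' := if chunk ≠ "" ∧ (s[j]'h) ≠ "" then chunk ++ " " ++ (s[j]'h) else chunk ++ (s[j]'h) with hc'
        by_cases hbig : m ≤ PySem.Str.len c'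
        · have hstep : mergeStepB m (acc, some chunk) (s[j]'h) = (acc ++ [c'], none) := by
            simp only [mergeStepB, ← hc', if_pos hbig]
          rw [hstep]
          have hstop : mergeInnerA s m fuelI c' (j + 1) = (c', j + 1) := by
            cases fuelI with
            | zero => rfl
            | succ f => rw [mergeInnerA, if_neg (by intro hcon; exact absurd hcon.2 (by omega))]
          rw [hstop]
          exact hP (j + 1) (acc ++ [c']) (by omega)
        · have hstep : mergeStepB m (acc, some chunk) (s[j]'h) = (acc, some c') := by
            simp only [mergeStepB, ← hc', if_neg hbig]
          rw [hstep]
          exact ih (j + 1) c' acc (by omega) (by omega) (by omega)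
      · have hge : s.length ≤ j := by omega
        rw [List.drop_eq_nil_of_le hge]
        rw [mergeInnerA, if_neg (by intro hcon; exact absurd hcon.1 (by omega))]
        rw [mergeOuterA_past s m fuelO _ _ hge]
        rfl

-- A's outer loop from index i matches B's fold over the remaining sentences with an empty buffer
theorem outerA_agrees (s : List String) (m : Int) :
    ∀ (fuelO i : Nat) (acc : List String), s.length - i ≤ fuelO →
      mergeOuterA s m fuelO acc i = finB ((s.drop i).foldl (mergeStepB m) (acc, none)) := by
  intro fuelO
  induction fuelO with
  | zero =>
      intro i acc hi
      have hge : s.length ≤ i := by omega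
      rw [List.drop_eq_nil_of_le hge, mergeOuterA_past s m 0 _ _ hge]
      rfl
  | succ fuelO ih =>
      intro i acc hi
      by_cases h : i < s.length
      · rw [List.drop_eq_getElem_cons h]
        rw [mergeOuterA, if_pos h]
        simp only [List.foldl_cons, List.getD_eq_getElem s "" h]
        by_cases hbig : m ≤ PySem.Str.len (s[i]'h)
        · rw [if_pos hbig]
          have hstep : mergeStepB m (acc, none) (s[i]'h) = (acc ++ [s[i]'h], none) := by
            simp only [mergeStepB, if_pos hbig]
          rw [hstep]
          exact ih (i + 1) (acc ++ [s[i]'h]) (by omega)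
        · rw [if_neg hbig]
          have hstep : mergeStepB m (acc, none) (s[i]'h) = (acc, some (s[i]'h)) := by
            simp only [mergeStepB, if_neg hbig]
          rw [hstep]
          exact innerA_agrees s m fuelO ih (s.length - (i + 1)) (i + 1) (s[i]'h) acc
            (le_refl _) (by omega) (by omega)
      · have hge : s.length ≤ i := by omega
        rw [List.drop_eq_nil_of_le hge, mergeOuterA_past s m _ _ _ hge]
        rfl

-- ===== VERDICT (by name: the statement is the Claim_ definition above) =====
theorem merge_small_sentences_py_spec : Claim_equal_merge_small_sentences_py := by
  intro sentences min_size _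
  unfold Spec_merge_small_sentences_py merge_small_sentences_py merge_small_sentences_py_alt
  by_cases hnil : sentences = []
  · rw [if_pos hnil, if_pos hnil]
  · rw [if_neg hnil, if_neg hnil]
    by_cases hm : min_size ≤ 0
    · rw [if_pos hm, if_pos hm]
    · rw [if_neg hm, if_neg hm]
      have h := outerA_agrees sentences min_size sentences.length 0 [] (by omega)
      simp only [List.drop_zero] at h
      rw [h]
      rfl
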